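-- pv_equiv track=rewrite | github.com/LudwikaMalinowska/InteligencjaObliczeniowa2022 | Projekt1/nonogram2_swarm.py | check_column
-- ===== SOURCE A (Python) =====
-- def check_column(column):
--     length = 0
--     rul = []
--     for gene in column:
--         if gene == 1:
--             length += 1
--         elif length != 0 and gene == 0:
--             rul.append(length)
--             length = 0
--
--     if length != 0:
--         rul.append(length)
--
--     return rul
-- ===== SOURCE B (Python) =====
-- def check_column(column):
--     # segment-first decomposition: skip zeros, grab a maximal nonzero block,
--     # count the 1s inside it, keep the count if nonzero
--     rul = []
--     i, n = 0, len(column)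
--     while i < n:
--         if column[i] == 0:
--             i += 1
--             continue
--         j = i
--         while j < n and column[j] != 0:
--             j += 1
--         c = column[i:j].count(1)
--         if c:
--             rul.append(c)
--         i = j
--     return rul
-- ===== Notes on version B (the rewrite author's own statement) =====
-- stated objective: alternative
-- what changed: Replaced A's single-pass counter state machine with a segment-first scan: skip zeros, take each maximal nonzero block, count the 1s inside it, and append the count when nonzero.
import Mathlib
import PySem

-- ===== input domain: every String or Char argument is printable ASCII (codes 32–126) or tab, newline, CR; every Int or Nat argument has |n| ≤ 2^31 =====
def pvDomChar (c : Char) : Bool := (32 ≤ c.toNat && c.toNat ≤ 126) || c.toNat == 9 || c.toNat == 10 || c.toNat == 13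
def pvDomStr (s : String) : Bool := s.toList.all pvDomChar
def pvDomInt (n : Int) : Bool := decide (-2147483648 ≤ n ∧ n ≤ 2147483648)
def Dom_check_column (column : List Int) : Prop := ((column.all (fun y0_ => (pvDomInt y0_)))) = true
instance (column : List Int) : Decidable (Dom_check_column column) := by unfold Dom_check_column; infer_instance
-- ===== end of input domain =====

-- B is an alternative decomposition (segment scan instead of a counter state machine); return value only, no side effects.

-- ===== PORT A =====
def check_column (column : List Int) : List Int :=
  let st := column.foldl (fun (s : Int × List Int) gene =>
    if gene = 1 then (s.1 + 1, s.2)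
    else if s.1 ≠ 0 ∧ gene = 0 then (0, s.2 ++ [s.1])
    else s) (0, [])
  if st.1 ≠ 0 then st.2 ++ [st.1] else st.2

-- ===== PORT B =====
-- mirrors Source B's outer while loop as recursion on the remaining suffix:
-- skip a zero, or take the maximal nonzero prefix (the inner while j loop),
-- count the 1s in it (list.count) and keep the count when nonzero
def checkColGo : List Int → List Int
  | [] => []
  | x :: xs =>
    if x = 0 then checkColGo xs
    else
      let seg := List.takeWhile (fun y => y != 0) (x :: xs)
      let rest := List.dropWhile (fun y => y != 0) (x :: xs)
      let c : Int := (seg.count 1 : Nat)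
      (if c ≠ 0 then [c] else []) ++ checkColGo rest
  termination_by l => l.length
  decreasing_by
    · simp
    · rename_i h
      have hx : (x != 0) = true := by simpa using h
      simp only [List.dropWhile_cons, hx, if_true]
      exact Nat.lt_succ_of_le (List.length_dropWhile_le _ _)

def check_column_alt (column : List Int) : List Int := checkColGo column

-- ===== PRECONDITION & SPEC =====
def Spec_check_column (column : List Int) (out : List Int) : Prop := out = check_column_alt column
instance (column : List Int) (out : List Int) : Decidable (Spec_check_column column out) := by unfold Spec_check_column; infer_instance

-- ===== CLAIM (what is proved, stated in full; the proofs are below) =====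
def Claim_equal_check_column : Prop := ∀ (column : List Int), Dom_check_column column → Spec_check_column column (check_column column)

-- ===== LEMMAS AND PROOFS =====

-- abstract form of A's loop body as structural recursion (proof helper only)
def fA (len : Int) : List Int → List Int
  | [] => if len ≠ 0 then [len] else []
  | g :: gs =>
    if g = 1 then fA (len + 1) gs
    else if len ≠ 0 ∧ g = 0 then len :: fA 0 gs
    else fA len gs

def cnt (col : List Int) : Int :=
  ((List.takeWhile (fun y => y != 0) col).count 1 : Nat)

-- A's fold with finishing step equals fA
theorem fold_eq (col : List Int) : ∀ (len : Int) (rul : List Int),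
    (let st := col.foldl (fun (s : Int × List Int) gene =>
      if gene = 1 then (s.1 + 1, s.2)
      else if s.1 ≠ 0 ∧ gene = 0 then (0, s.2 ++ [s.1])
      else s) (len, rul)
     if st.1 ≠ 0 then st.2 ++ [st.1] else st.2) = rul ++ fA len col := by
  induction col with
  | nil => intro len rul; by_cases h : len = 0 <;> simp [fA, h]
  | cons g gs ih =>
    intro len rul
    simp only [List.foldl_cons, fA]
    by_cases h1 : g = 1
    · simp [h1, ih]
    · by_cases h2 : len ≠ 0 ∧ g = 0
      · simp [h1, h2, ih]
      · simp [h1, h2, ih]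

theorem go_head (gs : List Int) :
    (if cnt gs ≠ 0 then [cnt gs] else []) ++
      checkColGo (List.dropWhile (fun y => y != 0) gs) = checkColGo gs := by
  cases gs with
  | nil => simp [cnt, checkColGo]
  | cons x xs =>
    by_cases hx : x = 0
    · simp [cnt, hx, List.takeWhile, List.dropWhile, checkColGo]
    · rw [checkColGo]
      simp [cnt, hx]

theorem fA_eq (col : List Int) : ∀ (len : Int),
    fA len col = (if len + cnt col ≠ 0 then [len + cnt col] else []) ++
      checkColGo (List.dropWhile (fun y => y != 0) col) := by
  induction col with
  | nil => intro len; simp [fA, cnt, checkColGo]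
  | cons g gs ih =>
    intro len
    by_cases h1 : g = 1
    · have hc : cnt (g :: gs) = 1 + cnt gs := by
        simp [cnt, h1, List.takeWhile]
        omega
      have hd : List.dropWhile (fun y => y != 0) (g :: gs)
          = List.dropWhile (fun y => y != 0) gs := by
        simp [h1, List.dropWhile]
      rw [hd, hc]
      have : len + (1 + cnt gs) = (len + 1) + cnt gs := by ring
      rw [this]
      simpa [fA, h1] using ih (len + 1)
    · by_cases h0 : g = 0
      · have hc : cnt (g :: gs) = 0 := by simp [cnt, h0, List.takeWhile]
        have hd : List.dropWhile (fun y => y != 0) (g :: gs) = g :: gs := by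
          simp [h0, List.dropWhile]
        rw [hd, hc, add_zero]
        have hrec : fA 0 gs = checkColGo gs := by
          rw [ih 0]
          simpa using go_head gs
        by_cases hl : len = 0
        · simp [fA, h1, h0, hl, hrec, checkColGo]
        · simp [fA, h1, h0, hl, hrec, checkColGo]
      · have hg : (g != 0) = true := by simpa using h0
        have hc : cnt (g :: gs) = cnt gs := by
          simp [cnt, List.takeWhile_cons, hg, h1]
        have hd : List.dropWhile (fun y => y != 0) (g :: gs)
            = List.dropWhile (fun y => y != 0) gs := by
          simp [List.dropWhile_cons, hg]
        rw [hd, hc]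
        simpa [fA, h1, h0] using ih len

-- ===== VERDICT (by name: the statement is the Claim_ definition above) =====
theorem check_column_spec : Claim_equal_check_column := by
  intro column _
  unfold Spec_check_column check_column check_column_alt
  rw [fold_eq column 0 []]
  rw [fA_eq column 0]
  simpa using go_head column
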